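-- pv_equiv track=rewrite | github.com/JaeheonNa/python-basic | codingTest/cellularKeyboard.py | solution
-- ===== SOURCE A (Python) =====
-- def solution(keymap, targets):
--     answer = []
--
--     keyDict = dict()
--     for key in keymap:
--         for i in range(len(key)):
--             alpha = key[i]
--             cnt = keyDict.get(alpha, len(key))
--             if cnt > i:
--                 keyDict[alpha] = i
--
--     for target in targets:
--         tempAnswer = 0
--         for alpha in target:
--             if keyDict.get(alpha, -1) == -1:
--                 tempAnswer = -1
--                 break
--             tempAnswer += keyDict.get(alpha) + 1
--         answer.append(tempAnswer)
--     return answer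
-- ===== SOURCE B (Python) =====
-- def solution(keymap, targets):
--     # No precomputed dictionary: for each target character, scan keymap directly
--     # and take the smallest first-occurrence index via str.find.
--     def press(t):
--         total = 0
--         for c in t:
--             best = min((k.find(c) for k in keymap if c in k), default=-1)
--             if best == -1:
--                 return -1
--             total += best + 1
--         return total
--     return [press(t) for t in targets]
-- ===== Notes on version B (the rewrite author's own statement) =====
-- stated objective: alternative
-- what changed: B drops A's precomputed char-to-min-index dictionary entirely: for each target character it scans the keymap directly, taking min of k.find(c) over the keys containing c (default -1), trading A's O(K+T) dict precomputation for a direct O(K*T) per-character scan.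
import Mathlib
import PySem

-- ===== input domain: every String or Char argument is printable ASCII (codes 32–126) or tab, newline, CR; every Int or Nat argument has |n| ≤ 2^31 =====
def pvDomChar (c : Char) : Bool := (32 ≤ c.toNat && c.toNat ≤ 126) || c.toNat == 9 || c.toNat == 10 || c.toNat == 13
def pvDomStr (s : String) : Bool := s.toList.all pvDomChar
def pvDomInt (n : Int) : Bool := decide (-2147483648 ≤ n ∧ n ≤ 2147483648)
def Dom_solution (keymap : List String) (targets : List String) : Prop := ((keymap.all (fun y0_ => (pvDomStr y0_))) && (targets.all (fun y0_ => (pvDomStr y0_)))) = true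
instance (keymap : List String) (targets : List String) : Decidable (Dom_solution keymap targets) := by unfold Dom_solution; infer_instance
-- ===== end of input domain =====

-- B drops A's precomputed char->min-index dictionary: each target character is costed by a direct
-- scan of the keymap (min of k.find(c) over keys containing c, default -1); objective: alternative.


-- ===== PORT A =====
-- inner loop over one target: tempAnswer with break → structural recursion returning -1 on the break
def solTargetLoop (d : PySem.Dict Char Int) : List Char → Int → Int
  | [], acc => acc
  | c :: cs, acc =>
      if d.getD c (-1) = -1 then -1
      else solTargetLoop d cs (acc + (d.getD c (-1) + 1))

def solution (keymap : List String) (targets : List String) : List Int :=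
  let keyDict : PySem.Dict Char Int :=
    keymap.foldl (fun d key =>
      (PySem.List.pyRange 0 (PySem.Str.len key) 1).foldl (fun d i =>
        -- key[i]; i ranges over range(len(key)) so the default is never used
        let alpha := PySem.List.pyGetD key.toList i ' '
        let cnt := d.getD alpha (PySem.Str.len key)
        if cnt > i then d.insert alpha i else d) d) PySem.Dict.empty
  targets.foldl (fun answer target => answer ++ [solTargetLoop keyDict target.toList 0]) []

-- ===== PORT B =====
-- press: per-character direct scan of keymap, min(k.find(c) for k in keymap if c in k, default=-1)
def pressGo (keymap : List String) : List Char → Int → Int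
  | [], total => total
  | c :: cs, total =>
      let best := PySem.List.minD
        ((keymap.filter (fun k => PySem.Str.isIn (String.ofList [c]) k)).map
          (fun k => PySem.Str.find k (String.ofList [c]))) (fun x => x) (-1)
      if best = -1 then -1 else pressGo keymap cs (total + (best + 1))

def solution_alt (keymap : List String) (targets : List String) : List Int :=
  targets.map (fun t => pressGo keymap t.toList 0)

-- ===== PRECONDITION & SPEC =====
def Spec_solution (keymap : List String) (targets : List String) (out : List Int) : Prop := out = solution_alt keymap targets
instance (keymap : List String) (targets : List String) (out : List Int) : Decidable (Spec_solution keymap targets out) := by unfold Spec_solution; infer_instance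

-- ===== CLAIM (what is proved, stated in full; the proofs are below) =====
def Claim_equal_solution : Prop := ∀ (keymap : List String) (targets : List String), Dom_solution keymap targets → Spec_solution keymap targets (solution keymap targets)

-- ===== LEMMAS AND PROOFS =====

-- first index of character c in a character list, -1 if absent (proof-side mirror of k.find(c))
def firstIdx (c : Char) : List Char → Int
  | [] => -1
  | a :: s => if a = c then 0 else (if firstIdx c s = -1 then -1 else firstIdx c s + 1)

theorem firstIdx_cases (c : Char) (s : List Char) : firstIdx c s = -1 ∨ 0 ≤ firstIdx c s := by
  induction s with
  | nil => left; rfl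
  | cons a s ih =>
      rw [firstIdx]
      split
      · right; omega
      · rcases ih with h | h
        · left; simp [h]
        · right; rw [if_neg (by omega)]; omega

theorem firstIdx_eq_neg_one_iff (c : Char) (s : List Char) : firstIdx c s = -1 ↔ c ∉ s := by
  induction s with
  | nil => simp [firstIdx]
  | cons a s ih =>
      rw [firstIdx, List.mem_cons]
      by_cases hac : a = c
      · simp [hac]
      · rw [if_neg hac]
        rcases firstIdx_cases c s with h | h
        · rw [if_pos h]
          simp [ih.mp h, Ne.symm hac]
        · rw [if_neg (by omega)]
          constructor
          · intro; omega
          · intro hm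
            push Not at hm
            exact absurd (ih.mpr hm.2) (by omega)

theorem singleton_prefix_cons (c a : Char) (l : List Char) : [c] <+: (a :: l) ↔ a = c := by
  constructor
  · rintro ⟨t, ht⟩; simpa using (congrArg List.head? ht).symm
  · rintro rfl; exact ⟨l, rfl⟩

-- k.find(c) for a single character equals firstIdx
theorem find_singleton (c : Char) : ∀ s : List Char, PySem.Chars.find s [c] = firstIdx c s := by
  intro s
  induction s with
  | nil =>
      rw [firstIdx, PySem.Chars.find_eq_neg_one_iff]
      simp
  | cons a s ih =>
      rw [firstIdx]
      by_cases hac : a = c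
      · rw [if_pos hac]
        have hin : [c] <:+: (a :: s) := (List.singleton_infix_iff c _).mpr (by simp [hac])
        have h0 : 0 ≤ PySem.Chars.find (a :: s) [c] := (PySem.Chars.find_nonneg_iff _ _).mpr hin
        obtain ⟨hpre, hmin⟩ := PySem.Chars.find_spec h0
        by_cases ht : (PySem.Chars.find (a :: s) [c]).toNat = 0
        · omega
        · exact absurd ((singleton_prefix_cons c a s).mpr hac)
            (by simpa using hmin 0 (by omega))
      · rw [if_neg hac]
        rcases firstIdx_cases c s with h | h
        · rw [if_pos h, PySem.Chars.find_eq_neg_one_iff]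
          have hs : ¬ [c] <:+: s := (PySem.Chars.find_eq_neg_one_iff s [c]).mp (ih.trans h)
          intro hin
          rcases List.infix_cons_iff.mp hin with hp | hi
          · exact hac ((singleton_prefix_cons c a s).mp hp)
          · exact hs hi
        · rw [if_neg (by omega), ← ih]
          have h' : 0 ≤ PySem.Chars.find s [c] := ih ▸ h
          have hin : [c] <:+: s := (PySem.Chars.find_nonneg_iff _ _).mp h'
          have hin' : [c] <:+: (a :: s) := List.infix_cons_iff.mpr (Or.inr hin)
          have h0 : 0 ≤ PySem.Chars.find (a :: s) [c] := (PySem.Chars.find_nonneg_iff _ _).mpr hin'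
          obtain ⟨hpre, hmin⟩ := PySem.Chars.find_spec h0
          obtain ⟨hpre', hmin'⟩ := PySem.Chars.find_spec h'
          set F := PySem.Chars.find (a :: s) [c] with hF
          set r := PySem.Chars.find s [c] with hr
          have htne : F.toNat ≠ 0 := by
            intro h0'
            rw [h0'] at hpre
            exact hac ((singleton_prefix_cons c a s).mp (by simpa using hpre))
          have hdrop : List.drop F.toNat (a :: s) = List.drop (F.toNat - 1) s := by
            cases hFt : F.toNat with
            | zero => exact absurd hFt htne
            | succ n => simp [List.drop_succ_cons]
          have h1 : r.toNat ≤ F.toNat - 1 := by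
            by_contra hlt
            exact hmin' (F.toNat - 1) (by omega) (hdrop ▸ hpre)
          have h2 : ¬ (r.toNat + 1 < F.toNat) := by
            intro hlt
            exact hmin (r.toNat + 1) hlt (by simpa [List.drop_succ_cons] using hpre')
          omega

-- effect of processing one key (as its enumerate list, starting at offset j) on the dict, per character
theorem enum_fold_get (L : Int) (c : Char) :
    ∀ (s : List Char) (j : Int) (d : PySem.Dict Char Int),
      0 ≤ j → j + s.length ≤ L →
      ((PySem.List.enumerate s j).foldl
          (fun d p => if d.getD p.2 L > p.1 then d.insert p.2 p.1 else d) d).get? c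
        = (if firstIdx c s = -1 then d.get? c
           else match d.get? c with
            | none => some (j + firstIdx c s)
            | some v => some (min v (j + firstIdx c s))) := by
  intro s
  induction s with
  | nil => intro j d _ _; simp [PySem.List.enumerate, firstIdx]
  | cons a s ih =>
      intro j d hj hL
      have hL' : j + 1 + (s.length : Int) ≤ L := by simp at hL; omega
      have hstep : PySem.List.enumerate (a :: s) j = (j, a) :: PySem.List.enumerate s (j + 1) := by
        simp [PySem.List.enumerate]
      rw [hstep, List.foldl_cons]
      have hbeta : (if d.getD (j, a).2 L > (j, a).1 then d.insert (j, a).2 (j, a).1 else d)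
          = (if d.getD a L > j then d.insert a j else d) := rfl
      rw [hbeta, ih (j + 1) _ (by omega) hL']
      by_cases hac : a = c
      · subst hac
        have hfa : firstIdx a (a :: s) = 0 := by rw [firstIdx, if_pos rfl]
        cases hg : d.get? a with
        | none =>
            have hD : (if d.getD a L > j then d.insert a j else d).get? a = some j := by
              rw [PySem.Dict.getD_eq_get?_getD, hg, Option.getD_none, if_pos (by omega)]
              simp
            rcases firstIdx_cases a s with hfs | hfs
            · rw [hD, hfa, if_pos hfs, if_neg (by omega : ¬(0:Int) = -1)]
              simp
            · rw [hD, hfa, if_neg (show ¬ firstIdx a s = -1 by omega),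
                if_neg (by omega : ¬(0:Int) = -1)]
              simp only []
              congr 1
              omega
        | some v =>
            by_cases hv : j < v
            · have hD : (if d.getD a L > j then d.insert a j else d).get? a = some j := by
                rw [PySem.Dict.getD_eq_get?_getD, hg, Option.getD_some, if_pos (by omega)]
                simp
              rcases firstIdx_cases a s with hfs | hfs
              · rw [hD, hfa, if_pos hfs, if_neg (by omega : ¬(0:Int) = -1)]
                simp only []
                congr 1
                omega
              · rw [hD, hfa, if_neg (show ¬ firstIdx a s = -1 by omega),
                  if_neg (by omega : ¬(0:Int) = -1)]
                simp only []
                congr 1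
                omega
            · have hD : (if d.getD a L > j then d.insert a j else d).get? a = some v := by
                rw [PySem.Dict.getD_eq_get?_getD, hg, Option.getD_some, if_neg (by omega)]
                exact hg
              rcases firstIdx_cases a s with hfs | hfs
              · rw [hD, hfa, if_pos hfs, if_neg (by omega : ¬(0:Int) = -1)]
                simp only []
                congr 1
                omega
              · rw [hD, hfa, if_neg (show ¬ firstIdx a s = -1 by omega),
                  if_neg (by omega : ¬(0:Int) = -1)]
                simp only []
                congr 1
                omega
      · have hkeep : (if d.getD a L > j then d.insert a j else d).get? c = d.get? c := by
          split
          · rw [PySem.Dict.get?_insert]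
            exact if_neg (fun h => hac h.symm)
          · rfl
        have hfc : firstIdx c (a :: s)
            = (if firstIdx c s = -1 then -1 else firstIdx c s + 1) := by
          rw [firstIdx, if_neg hac]
        rw [hkeep, hfc]
        rcases firstIdx_cases c s with hfs | hfs
        · rw [hfs]
          simp
        · rw [if_neg (show ¬ firstIdx c s = -1 by omega),
            if_neg (show ¬ firstIdx c s = -1 by omega),
            if_neg (by omega : ¬ firstIdx c s + 1 = -1)]
          cases hg : d.get? c with
          | none =>
              simp only []
              congr 1
              omega
          | some v =>
              simp only []
              congr 1
              omega

-- per-character optional minimum over the whole keymap (proof-side value of the dict entry)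
def bOpt (km : List String) (c : Char) (o : Option Int) : Option Int :=
  km.foldl (fun o k =>
    if firstIdx c k.toList = -1 then o
    else match o with
      | none => some (firstIdx c k.toList)
      | some v => some (min v (firstIdx c k.toList))) o

-- A's dict-building fold, per character, computes bOpt
theorem build_get (c : Char) : ∀ (km : List String) (d : PySem.Dict Char Int),
    (km.foldl (fun d key =>
      (PySem.List.pyRange 0 (PySem.Str.len key) 1).foldl (fun d i =>
        let alpha := PySem.List.pyGetD key.toList i ' '
        let cnt := d.getD alpha (PySem.Str.len key)
        if cnt > i then d.insert alpha i else d) d) d).get? c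
    = bOpt km c (d.get? c) := by
  intro km
  induction km with
  | nil => intro d; rfl
  | cons key km ih =>
      intro d
      rw [List.foldl_cons, ih]
      have hkey :
          ((PySem.List.pyRange 0 (PySem.Str.len key) 1).foldl (fun d i =>
            let alpha := PySem.List.pyGetD key.toList i ' '
            let cnt := d.getD alpha (PySem.Str.len key)
            if cnt > i then d.insert alpha i else d) d).get? c
          = (if firstIdx c key.toList = -1 then d.get? c
             else match d.get? c with
               | none => some (firstIdx c key.toList)
               | some v => some (min v (firstIdx c key.toList))) := by
        have := enum_fold_get (PySem.Str.len key) c key.toList 0 d (by omega)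
          (by simp [PySem.Str.len_eq])
        rw [PySem.List.enumerate_eq_map_pyRange key.toList ' ', List.foldl_map,
          PySem.List.len, ← PySem.Str.len_eq] at this
        simpa using this
      rw [hkey]
      conv_rhs => rw [bOpt, List.foldl_cons]
      rw [← bOpt]

-- B's min-of-finds scan, per character, also computes bOpt
theorem best_eq_bOpt (km : List String) (c : Char) :
    PySem.List.minD
      ((km.filter (fun k => PySem.Str.isIn (String.ofList [c]) k)).map
        (fun k => PySem.Str.find k (String.ofList [c]))) (fun x => x) (-1)
    = (bOpt km c none).getD (-1) := by
  rw [PySem.List.minD, PySem.List.min?, List.foldl_map,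
    ← PySem.List.foldl_if_eq_foldl_filter]
  congr 1
  rw [bOpt]
  refine PySem.List.foldl_congr_mem _ _ _ _ (fun o k _ => ?_)
  have hfind : PySem.Str.find k (String.ofList [c]) = firstIdx c k.toList := by
    rw [PySem.Str.find_eq, String.toList_ofList]
    exact find_singleton c k.toList
  have hisin : PySem.Str.isIn (String.ofList [c]) k = true ↔ ¬ firstIdx c k.toList = -1 := by
    rw [PySem.Str.isIn_iff_infix, String.toList_ofList, List.singleton_infix_iff,
      firstIdx_eq_neg_one_iff]
    simp
  by_cases hf : firstIdx c k.toList = -1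
  · rw [if_neg (fun h => (hisin.mp h) hf), if_pos hf]
  · rw [if_pos (hisin.mpr hf), if_neg hf, hfind]
    cases o with
    | none => rfl
    | some v =>
        simp only []
        by_cases hlt : firstIdx c k.toList < v
        · rw [if_pos hlt]
          congr 1
          omega
        · rw [if_neg hlt]
          congr 1
          omega

-- A's per-target loop equals B's press when the dict entry agrees with the scan everywhere
theorem loops_eq (km : List String) (d : PySem.Dict Char Int)
    (h : ∀ c, d.getD c (-1)
      = PySem.List.minD
          ((km.filter (fun k => PySem.Str.isIn (String.ofList [c]) k)).map
            (fun k => PySem.Str.find k (String.ofList [c]))) (fun x => x) (-1)) :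
    ∀ (cs : List Char) (acc : Int), solTargetLoop d cs acc = pressGo km cs acc := by
  intro cs
  induction cs with
  | nil => intro acc; rfl
  | cons c cs ih =>
      intro acc
      rw [solTargetLoop, pressGo]
      simp only [← h c]
      split
      · rfl
      · exact ih _

-- ===== VERDICT (by name: the statement is the Claim_ definition above) =====
theorem solution_spec : Claim_equal_solution := by
  intro keymap targets _
  unfold Spec_solution solution solution_alt
  rw [PySem.List.foldl_append_singleton_eq_map]
  simp only [List.nil_append]
  refine List.map_congr_left (fun t _ => ?_)
  refine loops_eq keymap _ (fun c => ?_) t.toList 0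
  rw [PySem.Dict.getD_eq_get?_getD, build_get c keymap PySem.Dict.empty,
    PySem.Dict.get?_empty, best_eq_bOpt]
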